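-- pv_equiv track=rewrite | github.com/CCChz233/codeindex_java | hybrid_platform/hybrid_platform/grep_baseline.py | symbol_id_to_java_suffix
-- ===== SOURCE A (Python) =====
-- from typing import Any, Dict, List, Optional, Set, Tuple
--
-- def symbol_id_to_java_suffix(symbol_id: str) -> Optional[str]:
--     """从 SCIP symbol_id 抽出 ``org/.../Foo.java`` / ``io/netty/...`` 等源文件相对路径后缀。"""
--     if "#" not in symbol_id:
--         return None
--     # 常见 Java 源码根（与 Gradle/Maven 的 src/main/java 下包路径一致）
--     roots = ("org/", "com/", "io/", "javax/", "java/")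
--     idx = -1
--     for r in roots:
--         j = symbol_id.find(r)
--         if j != -1 and (idx == -1 or j < idx):
--             idx = j
--     if idx == -1:
--         return None
--     rest = symbol_id[idx:]
--     base = rest.split("#", 1)[0].strip()
--     if not base:
--         return None
--     if base.endswith(".java"):
--         return base
--     return base + ".java"
-- ===== SOURCE B (Python) =====
-- def symbol_id_to_java_suffix(symbol_id):
--     """从 SCIP symbol_id 抽出 ``org/.../Foo.java`` 等源文件相对路径后缀。
--
--     Single left-to-right scan with tuple-startswith instead of five find() passes
--     with min tracking."""
--     if "#" not in symbol_id:
--         return None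
--     roots = ("org/", "com/", "io/", "javax/", "java/")
--     for i in range(len(symbol_id)):
--         if symbol_id.startswith(roots, i):
--             base = symbol_id[i:].split("#", 1)[0].strip()
--             if not base:
--                 return None
--             if base.endswith(".java"):
--                 return base
--             return base + ".java"
--     return None
-- ===== Notes on version B (the rewrite author's own statement) =====
-- stated objective: idiomatic
-- what changed: B replaces A's five separate str.find passes with -1/min bookkeeping by a single left-to-right scan that tests a tuple of roots with str.startswith at each position, returning at the first (leftmost) match.
import Mathlib
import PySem

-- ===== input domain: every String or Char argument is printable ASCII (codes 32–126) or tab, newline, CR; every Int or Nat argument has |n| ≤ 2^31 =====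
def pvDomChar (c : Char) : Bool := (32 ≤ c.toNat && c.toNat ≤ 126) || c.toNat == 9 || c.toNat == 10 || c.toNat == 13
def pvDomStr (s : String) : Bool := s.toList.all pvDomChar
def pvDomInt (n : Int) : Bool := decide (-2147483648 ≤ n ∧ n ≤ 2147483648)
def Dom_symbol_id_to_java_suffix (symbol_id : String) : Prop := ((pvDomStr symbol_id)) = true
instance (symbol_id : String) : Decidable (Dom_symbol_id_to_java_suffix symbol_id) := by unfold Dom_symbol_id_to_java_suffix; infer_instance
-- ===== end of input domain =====

-- B replaces A's five str.find passes with min tracking by one left-to-right scan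
-- testing all roots at each position (idiomatic; same asymptotic cost).


-- ===== PORT A =====
-- the tuple `roots` both Pythons share as data
def pvRoots : List (List Char) :=
  [['o','r','g','/'], ['c','o','m','/'], ['i','o','/'], ['j','a','v','a','x','/'], ['j','a','v','a','/']]

-- A on List Char: five find() passes, min tracked in `idx` with -1 as "absent"
def pvJavaSuffixA (s : List Char) : Option (List Char) :=
  if PySem.Chars.isIn ['#'] s = false then none
  else
    let idx := pvRoots.foldl (fun idx r =>
      let j := PySem.Chars.find s r
      if j ≠ -1 ∧ (idx = -1 ∨ j < idx) then j else idx) (-1)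
    if idx = -1 then none
    else
      let rest := PySem.List.slice s (some idx) none
      let base := PySem.Chars.strip ((PySem.Chars.splitOnMax rest ['#'] 1).headD [])
      if base = [] then none
      else if PySem.Chars.endswith base ['.','j','a','v','a'] then some base
      else some (base ++ ['.','j','a','v','a'])

def symbol_id_to_java_suffix (symbol_id : String) : Option String :=
  (pvJavaSuffixA symbol_id.toList).map String.ofList

-- ===== PORT B =====
-- B's loop `for i in range(len(s)): if s.startswith(roots, i)` = recursion over suffixes
def pvScanB (s : List Char) : Option (List Char) :=
  match s with
  | [] => none
  | c :: t =>
    if pvRoots.any (fun r => PySem.Chars.startswith (c :: t) r) then some (c :: t)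
    else pvScanB t

def pvJavaSuffixB (s : List Char) : Option (List Char) :=
  if PySem.Chars.isIn ['#'] s = false then none
  else
    match pvScanB s with
    | none => none
    | some rest =>
      let base := PySem.Chars.strip ((PySem.Chars.splitOnMax rest ['#'] 1).headD [])
      if base = [] then none
      else if PySem.Chars.endswith base ['.','j','a','v','a'] then some base
      else some (base ++ ['.','j','a','v','a'])

def symbol_id_to_java_suffix_alt (symbol_id : String) : Option String :=
  (pvJavaSuffixB symbol_id.toList).map String.ofList

-- ===== PRECONDITION & SPEC =====
def Spec_symbol_id_to_java_suffix (symbol_id : String) (out : Option String) : Prop := out = symbol_id_to_java_suffix_alt symbol_id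
instance (symbol_id : String) (out : Option String) : Decidable (Spec_symbol_id_to_java_suffix symbol_id out) := by unfold Spec_symbol_id_to_java_suffix; infer_instance

-- ===== CLAIM (what is proved, stated in full; the proofs are below) =====
def Claim_equal_symbol_id_to_java_suffix : Prop := ∀ (symbol_id : String), Dom_symbol_id_to_java_suffix symbol_id → Spec_symbol_id_to_java_suffix symbol_id (symbol_id_to_java_suffix symbol_id)

-- ===== LEMMAS AND PROOFS =====

-- the min-with-(-1) fold of port A, named for the proofs
def pvFold (s : List Char) (rs : List (List Char)) (a : Int) : Int :=
  rs.foldl (fun idx r =>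
    let j := PySem.Chars.find s r
    if j ≠ -1 ∧ (idx = -1 ∨ j < idx) then j else idx) a

-- full characterisation of the fold, by induction over the root list
lemma pvFold_spec (s : List Char) (rs : List (List Char)) :
    ∀ a : Int, -1 ≤ a →
      -1 ≤ pvFold s rs a ∧
      (pvFold s rs a = a ∨ ∃ r ∈ rs, pvFold s rs a = PySem.Chars.find s r) ∧
      (pvFold s rs a = -1 → a = -1 ∧ ∀ r ∈ rs, PySem.Chars.find s r = -1) ∧
      (pvFold s rs a ≤ a ∨ a = -1) ∧
      (∀ r ∈ rs, PySem.Chars.find s r ≠ -1 → pvFold s rs a ≤ PySem.Chars.find s r) := by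
  induction rs with
  | nil => intro a ha; simp [pvFold]; omega
  | cons r rs ih =>
    intro a ha
    have hjr : -1 ≤ PySem.Chars.find s r := PySem.Chars.neg_one_le_find s r
    have hstep : pvFold s (r :: rs) a =
        pvFold s rs (if PySem.Chars.find s r ≠ -1 ∧ (a = -1 ∨ PySem.Chars.find s r < a)
                     then PySem.Chars.find s r else a) := by
      simp only [pvFold, List.foldl_cons]
    by_cases hc : PySem.Chars.find s r ≠ -1 ∧ (a = -1 ∨ PySem.Chars.find s r < a)
    · rw [hstep, if_pos hc]
      obtain ⟨h1, h2, h3, h4, h5⟩ := ih (PySem.Chars.find s r) hjr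
      refine ⟨h1, ?_, ?_, ?_, ?_⟩
      · rcases h2 with h | ⟨r', hr', h⟩
        · exact Or.inr ⟨r, List.mem_cons_self, h⟩
        · exact Or.inr ⟨r', List.mem_cons_of_mem _ hr', h⟩
      · intro h0
        exact absurd ((h3 h0).1) hc.1
      · clear h2 h3 h5 hstep
        rcases h4 with h | h <;> rcases hc.2 with h' | h' <;> omega
      · intro r' hr' hner'
        rcases List.mem_cons.mp hr' with rfl | hmem
        · clear h2 h3 h5 hstep
          rcases h4 with h | h <;> omega
        · exact h5 r' hmem hner'
    · rw [hstep, if_neg hc]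
      obtain ⟨h1, h2, h3, h4, h5⟩ := ih a ha
      refine ⟨h1, ?_, ?_, h4, ?_⟩
      · rcases h2 with h | ⟨r', hr', h⟩
        · exact Or.inl h
        · exact Or.inr ⟨r', List.mem_cons_of_mem _ hr', h⟩
      · intro h0
        obtain ⟨ha0, hall⟩ := h3 h0
        refine ⟨ha0, ?_⟩
        intro r' hr'
        rcases List.mem_cons.mp hr' with rfl | hmem
        · by_contra hne
          exact hc ⟨hne, Or.inl ha0⟩
        · exact hall r' hmem
      · intro r' hr' hner'
        rcases List.mem_cons.mp hr' with rfl | hmem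
        · push Not at hc
          have hge' := hc hner'
          clear h2 h3 h5 hstep hc
          rcases h4 with h | h <;> omega
        · exact h5 r' hmem hner'

-- if no root occurs anywhere in s, B's scan finds nothing
lemma pvScanB_none (s : List Char) (h : ∀ r ∈ pvRoots, ¬ r <:+: s) : pvScanB s = none := by
  induction s with
  | nil => rfl
  | cons c t ih =>
    have hno : pvRoots.any (fun r => PySem.Chars.startswith (c :: t) r) = false := by
      simp only [List.any_eq_false]
      intro r hr
      simp only [PySem.Chars.startswith_iff]
      intro hpre
      exact h r hr hpre.isInfix
    simp only [pvScanB, hno, Bool.false_eq_true, if_false]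
    exact ih (fun r hr hinf => h r hr (hinf.trans (List.suffix_cons c t).isInfix))

-- if n is the first position where some root matches, B's scan returns the suffix there
lemma pvScanB_at (s : List Char) : ∀ n : Nat,
    (∃ r ∈ pvRoots, r <+: s.drop n) →
    (∀ m < n, ∀ r ∈ pvRoots, ¬ r <+: s.drop m) →
    pvScanB s = some (s.drop n) := by
  induction s with
  | nil =>
    intro n ⟨r, hr, hpre⟩ _
    exfalso
    simp only [List.drop_nil] at hpre
    have : r = [] := List.prefix_nil.mp hpre
    revert this
    fin_cases hr <;> decide
  | cons c t ih =>
    intro n hmatch hmin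
    match n with
    | 0 =>
      obtain ⟨r, hr, hpre⟩ := hmatch
      have : pvRoots.any (fun r => PySem.Chars.startswith (c :: t) r) = true := by
        simp only [List.any_eq_true]
        exact ⟨r, hr, (PySem.Chars.startswith_iff _ _).mpr (by simpa using hpre)⟩
      simp [pvScanB, this]
    | n' + 1 =>
      have hno : pvRoots.any (fun r => PySem.Chars.startswith (c :: t) r) = false := by
        simp only [List.any_eq_false]
        intro r hr
        simp only [PySem.Chars.startswith_iff]
        exact fun hpre => hmin 0 (Nat.succ_pos n') r hr (by simpa using hpre)
      simp only [pvScanB, hno, Bool.false_eq_true, if_false, List.drop_succ_cons]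
      exact ih n' (by simpa using hmatch)
        (fun m hm r hr => by
          have := hmin (m + 1) (by omega) r hr
          simpa using this)

-- infix of s ↔ prefix of some drop, via isIn
lemma pvInfix_iff_drop (r s : List Char) : r <:+: s ↔ ∃ j, r <+: s.drop j := by
  rw [← PySem.Chars.isIn_iff_infix, ← PySem.Chars.exists_prefix_drop_iff_isIn]

-- the core equivalence on List Char
lemma pvJavaSuffix_eq (s : List Char) : pvJavaSuffixA s = pvJavaSuffixB s := by
  unfold pvJavaSuffixA pvJavaSuffixB
  by_cases hin : PySem.Chars.isIn ['#'] s = false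
  · simp [hin]
  · rw [if_neg hin]
    obtain ⟨hge, hform, hneg, -, hle⟩ := pvFold_spec s pvRoots (-1) (le_refl _)
    set F := pvFold s pvRoots (-1) with hF
    have hFold : pvRoots.foldl (fun idx r =>
        let j := PySem.Chars.find s r
        if j ≠ -1 ∧ (idx = -1 ∨ j < idx) then j else idx) (-1) = F := rfl
    rw [hFold]
    by_cases h1 : F = -1
    · obtain ⟨-, hall⟩ := hneg h1
      have hscan : pvScanB s = none := by
        apply pvScanB_none
        intro r hr
        rw [← PySem.Chars.find_eq_neg_one_iff]
        exact hall r hr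
      simp [h1, hscan]
    · rcases hform with h | ⟨r0, hr0, hFr0⟩
      · exact absurd h h1
      have hF0 : 0 ≤ F := by omega
      have hfr0 : 0 ≤ PySem.Chars.find s r0 := by omega
      obtain ⟨hpre0, -⟩ := PySem.Chars.find_spec hfr0
      have hscan : pvScanB s = some (s.drop F.toNat) := by
        apply pvScanB_at s F.toNat
        · exact ⟨r0, hr0, by rwa [hFr0]⟩
        · intro m hm r hr hpre
          have hinf : r <:+: s := (pvInfix_iff_drop r s).mpr ⟨m, hpre⟩
          have hne : PySem.Chars.find s r ≠ -1 := (PySem.Chars.find_ne_neg_one_iff s r).mpr hinf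
          have hfr : 0 ≤ PySem.Chars.find s r := by
            have := PySem.Chars.neg_one_le_find s r; omega
          obtain ⟨-, hmin⟩ := PySem.Chars.find_spec hfr
          have h2 : (PySem.Chars.find s r).toNat ≤ m := by
            by_contra hlt
            exact hmin m (by omega) hpre
          have h3 : F ≤ PySem.Chars.find s r := hle r hr hne
          omega
      have hslice : PySem.List.slice s (some F) none = s.drop F.toNat :=
        PySem.List.slice_from s hF0
      simp [h1, hscan, hslice, hin]

theorem pvSpec_aux (symbol_id : String) :
    symbol_id_to_java_suffix symbol_id = symbol_id_to_java_suffix_alt symbol_id := by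
  unfold symbol_id_to_java_suffix symbol_id_to_java_suffix_alt
  rw [pvJavaSuffix_eq]

-- ===== VERDICT (by name: the statement is the Claim_ definition above) =====
theorem symbol_id_to_java_suffix_spec : Claim_equal_symbol_id_to_java_suffix := by
  intro symbol_id _
  exact pvSpec_aux symbol_id
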